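-- pv_equiv track=rewrite | github.com/liuwei464976266/mygit | hpfgf.py | check_four_three_of_a_kind
-- ===== SOURCE A (Python) =====
-- def check_four_three_of_a_kind(hand):
--     """检测是不是四张相同"""
--     frequencies = {}
--     frequencies_list = []
--     ranks = [i[2] for i in hand]
--     for rank in ranks:
--         if rank not in frequencies:
--             frequencies[rank] = 1
--         else:
--             frequencies[rank] += 1
--     for frequency in frequencies.values():
--         frequencies_list.append(int(frequency))
--
--     frequencies_list.sort()
--
--     # 判断list中是否有值为4
--     if frequencies_list == [1,3,3,3,3] or frequencies_list == [3,3,3,4]: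
--         return True
--     else:
--         return False
-- ===== SOURCE B (Python) =====
-- def check_four_three_of_a_kind(hand):
--     """检测是不是四张相同"""
--     ranks = [card[2] for card in hand]
--     if len(ranks) != 13:
--         return False
--     cnt = [ranks.count(r) for r in ranks]
--     return (all(c in (1, 3) for c in cnt) and cnt.count(1) == 1) or \
--            (all(c in (3, 4) for c in cnt) and cnt.count(4) == 4)
-- ===== Notes on version B (the rewrite author's own statement) =====
-- stated objective: alternative
-- what changed: B drops the counter dict and the sort entirely: after a length==13 check it labels every card with its rank's multiplicity in the rank list and decides by a per-card test (all multiplicities in {1,3} with exactly one singleton card, or all in {3,4} with exactly four quad cards).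
import Mathlib
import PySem

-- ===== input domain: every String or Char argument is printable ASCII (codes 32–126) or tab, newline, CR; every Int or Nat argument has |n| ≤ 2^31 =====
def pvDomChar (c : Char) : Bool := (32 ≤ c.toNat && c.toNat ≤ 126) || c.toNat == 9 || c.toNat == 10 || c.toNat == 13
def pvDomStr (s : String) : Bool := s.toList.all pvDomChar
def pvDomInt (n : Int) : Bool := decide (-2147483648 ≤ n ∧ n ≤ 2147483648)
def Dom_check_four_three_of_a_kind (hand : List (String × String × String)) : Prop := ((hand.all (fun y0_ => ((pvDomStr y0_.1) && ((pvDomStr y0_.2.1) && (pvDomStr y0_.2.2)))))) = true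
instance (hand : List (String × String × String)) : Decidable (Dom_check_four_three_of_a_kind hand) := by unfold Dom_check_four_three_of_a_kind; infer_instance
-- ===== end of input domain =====

-- B drops A's counter dict and sort: it checks length == 13 and classifies each card by
-- its rank's multiplicity in the rank list (a per-card membership/count test).

-- ===== PORT A =====
def check_four_three_of_a_kind (hand : List (String × String × String)) : Bool :=
  let frequencies : PySem.Dict String Int := PySem.Dict.empty
  let frequencies_list : List Int := []
  let ranks : List String := hand.map (fun i => i.2.2)
  let frequencies := ranks.foldl (fun d rank =>
      if d.contains rank = false then d.insert rank 1 else d.modify rank 0 (· + 1)) frequencies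
  -- int(frequency) is the identity on the Int values stored in the dict
  let frequencies_list := frequencies.values.foldl
      (fun acc frequency => acc ++ [frequency]) frequencies_list
  let fl := PySem.List.sorted frequencies_list (fun x => x) false
  if fl = [1, 3, 3, 3, 3] ∨ fl = [3, 3, 3, 4] then true else false

-- ===== PORT B =====
def check_four_three_of_a_kind_alt (hand : List (String × String × String)) : Bool :=
  let ranks : List String := hand.map (fun card => card.2.2)
  if ranks.length ≠ 13 then false
  else
    let cnt : List Int := ranks.map (fun r => ((PySem.List.count ranks r : Nat) : Int))
    ((cnt.all fun c => c == 1 || c == 3) && (PySem.List.count cnt 1 == 1)) ||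
      ((cnt.all fun c => c == 3 || c == 4) && (PySem.List.count cnt 4 == 4))

-- ===== PRECONDITION & SPEC =====
def Spec_check_four_three_of_a_kind (hand : List (String × String × String)) (out : Bool) : Prop := out = check_four_three_of_a_kind_alt hand
instance (hand : List (String × String × String)) (out : Bool) : Decidable (Spec_check_four_three_of_a_kind hand out) := by unfold Spec_check_four_three_of_a_kind; infer_instance

-- ===== CLAIM (what is proved, stated in full; the proofs are below) =====
def Claim_equal_check_four_three_of_a_kind : Prop := ∀ (hand : List (String × String × String)), Dom_check_four_three_of_a_kind hand → Spec_check_four_three_of_a_kind hand (check_four_three_of_a_kind hand)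

-- ===== LEMMAS AND PROOFS =====

-- A's "not in: set to 1 / else: += 1" step is exactly the Counter step.
lemma insert_one_eq_modify (d : PySem.Dict String Int) (r : String)
    (h : d.contains r = false) : d.insert r 1 = d.modify r 0 (· + 1) := by
  have hg : d.getD r 0 = 0 := PySem.Dict.getD_of_not_contains (d := d) (k := r) 0 h
  simp only [PySem.Dict.insert, PySem.Dict.modify, PySem.Dict.contains] at h ⊢
  simp [h, hg]

lemma foldA_eq_counter (ranks : List String) :
    ranks.foldl (fun d rank =>
        if d.contains rank = false then d.insert rank 1 else d.modify rank 0 (· + 1))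
      PySem.Dict.empty = PySem.Dict.counter ranks := by
  have hf : (fun (d : PySem.Dict String Int) (rank : String) =>
      if d.contains rank = false then d.insert rank 1 else d.modify rank 0 (· + 1))
      = fun d rank => d.modify rank 0 (· + 1) := by
    funext d rank
    by_cases h : d.contains rank = false
    · rw [if_pos h, insert_one_eq_modify d rank h]
    · rw [if_neg h]
  rw [hf, PySem.Dict.counter_eq_foldl]

-- the values of Counter(rs) are the multiplicities of the distinct elements of rs
lemma values_counter (rs : List String) :
    (PySem.Dict.counter rs).values
      = (PySem.Set.ofList rs).map (fun k => ((List.count k rs : Nat) : Int)) := by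
  have h : (PySem.Dict.counter rs).values = (PySem.Dict.counter rs).items.map (·.2) := rfl
  rw [h, PySem.Dict.items_counter, List.map_map]
  rfl

lemma sorted_eq_iff_perm (L T : List Int) (hT : T.Pairwise (· ≤ ·)) :
    PySem.List.sorted L (fun x => x) false = T ↔ L.Perm T := by
  constructor
  · intro h
    exact ((h ▸ PySem.List.sorted_perm L (fun x => x) false)).symm
  · intro h
    exact PySem.List.sorted_id_eq_of_perm_of_pairwise L T h.symm hT

lemma perm_char (L T : List Int) (a b : Int) (hab : a ≠ b)
    (hT : ∀ x ∈ T, x = a ∨ x = b) :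
    L.Perm T ↔ ((∀ x ∈ L, x = a ∨ x = b) ∧ L.count a = T.count a ∧ L.count b = T.count b) := by
  constructor
  · intro h
    exact ⟨fun x hx => hT x (h.mem_iff.mp hx), h.count_eq a, h.count_eq b⟩
  · rintro ⟨hmem, h1, h2⟩
    rw [List.perm_iff_count]
    intro x
    by_cases hxa : x = a
    · subst hxa; exact h1
    by_cases hxb : x = b
    · subst hxb; exact h2
    have hxL : x ∉ L := fun hx => by rcases hmem x hx with rfl | rfl <;> simp_all
    have hxT : x ∉ T := fun hx => by rcases hT x hx with rfl | rfl <;> simp_all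
    rw [List.count_eq_zero_of_not_mem hxL, List.count_eq_zero_of_not_mem hxT]

-- counting a value in a mapped multiplicity list = countP on the underlying list
lemma count_map_cnt (l rs : List String) (c : Nat) (ci : Int) (hc : ci = (c : Int)) :
    List.count ci (l.map (fun r => ((List.count r rs : Nat) : Int)))
      = List.countP (fun r => List.count r rs == c) l := by
  subst hc
  rw [List.count_eq_countP, List.countP_map]
  apply List.countP_congr
  intro r _
  simp

-- double counting: the cards whose rank has multiplicity c are the c-fold copies of the
-- distinct ranks with multiplicity c
lemma dc (rs : List String) (c : Nat) :
    List.countP (fun r => List.count r rs == c) rs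
      = c * List.countP (fun r => List.count r rs == c) (PySem.Set.ofList rs) := by
  classical
  set p : String → Bool := fun r => List.count r rs == c with hp
  -- LHS as a Finset sum of multiplicities
  have hsum := Multiset.toFinset_sum_count_eq (↑(rs.filter p) : Multiset String)
  simp only [Multiset.coe_count, Multiset.coe_card] at hsum
  rw [show ((↑(List.filter p rs) : Multiset String)).toFinset = (List.filter p rs).toFinset from rfl] at hsum
  have hF : (rs.filter p).toFinset = rs.toFinset.filter (fun x => p x = true) := by
    rw [List.toFinset_filter]
  have hterm : ∀ a ∈ rs.toFinset.filter (fun x => p x = true),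
      List.count a (rs.filter p) = c := by
    intro a ha
    rw [Finset.mem_filter] at ha
    have hpa : p a = true := ha.2
    rw [List.count_filter hpa]
    have := of_decide_eq_true (by simpa [hp, beq_iff_eq] using hpa : decide (List.count a rs = c) = true)
    exact this
  have hL : List.countP p rs = (rs.toFinset.filter (fun x => p x = true)).card * c := by
    rw [List.countP_eq_length_filter, ← hsum, hF, Finset.sum_congr rfl hterm,
      Finset.sum_const, smul_eq_mul]
  -- RHS as the same Finset's card
  have hnodupS := PySem.Set.nodup_ofList rs
  have hSfin : ((PySem.Set.ofList rs).filter p).toFinset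
      = rs.toFinset.filter (fun x => p x = true) := by
    rw [List.toFinset_filter]
    apply Finset.ext
    intro x
    simp [PySem.Set.mem_ofList]
  have hR : List.countP p (PySem.Set.ofList rs)
      = (rs.toFinset.filter (fun x => p x = true)).card := by
    rw [List.countP_eq_length_filter, ← hSfin]
    exact (List.toFinset_card_of_nodup (hnodupS.filter p)).symm
  rw [hL, hR, Nat.mul_comm]

-- if every card's rank multiplicity is a or b (a ≠ b), the two card classes partition the hand
lemma len_split (rs : List String) (a b : Nat) (hab : a ≠ b)
    (hmem : ∀ r ∈ rs, List.count r rs = a ∨ List.count r rs = b) :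
    rs.length = List.countP (fun r => List.count r rs == a) rs
      + List.countP (fun r => List.count r rs == b) rs := by
  rw [List.length_eq_countP_add_countP (fun r => List.count r rs == a)]
  congr 1
  apply List.countP_congr
  intro r hr
  rcases hmem r hr with h | h <;> simp [h, hab, Ne.symm hab]

-- membership bridge between the two multiplicity views
lemma mem_map_cnt (l rs : List String) (P : Int → Prop) :
    (∀ x ∈ l.map (fun r => ((List.count r rs : Nat) : Int)), P x)
      ↔ (∀ r ∈ l, P ((List.count r rs : Nat) : Int)) := by
  constructor
  · intro h r hr
    exact h _ (List.mem_map_of_mem hr)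
  · intro h x hx
    obtain ⟨r, hr, rfl⟩ := List.mem_map.mp hx
    exact h r hr

lemma mem_set_iff (rs : List String) (P : String → Prop) :
    (∀ r ∈ PySem.Set.ofList rs, P r) ↔ (∀ r ∈ rs, P r) := by
  constructor
  · intro h r hr
    exact h r ((PySem.Set.mem_ofList rs r).mpr hr)
  · intro h r hr
    exact h r ((PySem.Set.mem_ofList rs r).mp hr)

-- case [1,3,3,3,3]: one singleton rank and four triplet ranks
lemma case1 (rs : List String) :
    PySem.List.sorted ((PySem.Dict.counter rs).values) (fun x => x) false = [1, 3, 3, 3, 3]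
      ↔ (rs.length = 13
          ∧ (∀ r ∈ rs, List.count r rs = 1 ∨ List.count r rs = 3)
          ∧ List.countP (fun r => List.count r rs == 1) rs = 1) := by
  rw [values_counter, sorted_eq_iff_perm _ _ (by decide),
    perm_char _ _ 1 3 (by decide) (by decide)]
  rw [count_map_cnt _ rs 1 1 (by norm_num), count_map_cnt _ rs 3 3 (by norm_num)]
  rw [mem_map_cnt _ rs, mem_set_iff]
  have h1 : List.count (1 : Int) [1, 3, 3, 3, 3] = 1 := by decide
  have h3 : List.count (3 : Int) [1, 3, 3, 3, 3] = 4 := by decide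
  rw [h1, h3]
  have hmemiff : (∀ r ∈ rs, ((List.count r rs : Nat) : Int) = 1 ∨ ((List.count r rs : Nat) : Int) = 3)
      ↔ (∀ r ∈ rs, List.count r rs = 1 ∨ List.count r rs = 3) := by
    apply forall₂_congr
    intro r _
    constructor <;> (rintro (h | h) <;> [left; right] <;> exact_mod_cast h)
  rw [hmemiff]
  constructor
  · rintro ⟨hm, hs1, hs3⟩
    have d1 := dc rs 1
    have d3 := dc rs 3
    have hl := len_split rs 1 3 (by decide) hm
    exact ⟨by omega, hm, by omega⟩
  · rintro ⟨hlen, hm, hr1⟩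
    have d1 := dc rs 1
    have d3 := dc rs 3
    have hl := len_split rs 1 3 (by decide) hm
    exact ⟨hm, by omega, by omega⟩

-- case [3,3,3,4]: three triplet ranks and one quad rank
lemma case2 (rs : List String) :
    PySem.List.sorted ((PySem.Dict.counter rs).values) (fun x => x) false = [3, 3, 3, 4]
      ↔ (rs.length = 13
          ∧ (∀ r ∈ rs, List.count r rs = 3 ∨ List.count r rs = 4)
          ∧ List.countP (fun r => List.count r rs == 4) rs = 4) := by
  rw [values_counter, sorted_eq_iff_perm _ _ (by decide),
    perm_char _ _ 3 4 (by decide) (by decide)]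
  rw [count_map_cnt _ rs 3 3 (by norm_num), count_map_cnt _ rs 4 4 (by norm_num)]
  rw [mem_map_cnt _ rs, mem_set_iff]
  have h3 : List.count (3 : Int) [3, 3, 3, 4] = 3 := by decide
  have h4 : List.count (4 : Int) [3, 3, 3, 4] = 1 := by decide
  rw [h3, h4]
  have hmemiff : (∀ r ∈ rs, ((List.count r rs : Nat) : Int) = 3 ∨ ((List.count r rs : Nat) : Int) = 4)
      ↔ (∀ r ∈ rs, List.count r rs = 3 ∨ List.count r rs = 4) := by
    apply forall₂_congr
    intro r _
    constructor <;> (rintro (h | h) <;> [left; right] <;> exact_mod_cast h)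
  rw [hmemiff]
  constructor
  · rintro ⟨hm, hs3, hs4⟩
    have d3 := dc rs 3
    have d4 := dc rs 4
    have hl := len_split rs 3 4 (by decide) hm
    exact ⟨by omega, hm, by omega⟩
  · rintro ⟨hlen, hm, hr4⟩
    have d3 := dc rs 3
    have d4 := dc rs 4
    have hl := len_split rs 3 4 (by decide) hm
    exact ⟨hm, by omega, by omega⟩

theorem check_four_three_of_a_kind_spec : Claim_equal_check_four_three_of_a_kind := by
  intro hand _
  unfold Spec_check_four_three_of_a_kind check_four_three_of_a_kind check_four_three_of_a_kind_alt
  simp only [foldA_eq_counter, PySem.List.foldl_append_singleton, List.nil_append]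
  set rs := hand.map (fun i => i.2.2) with hrs
  have hc1 := case1 rs
  have hc2 := case2 rs
  have hif : ∀ (c : Prop) [Decidable c], ((if c then true else false) = true) ↔ c := by
    intro c _; split_ifs with h <;> simp [h]
  by_cases hlen : rs.length = 13
  · conv_rhs => rw [if_neg (by simp [hlen])]
    rw [Bool.eq_iff_iff, hif]
    rw [Bool.or_eq_true, Bool.and_eq_true, Bool.and_eq_true]
    simp only [List.all_eq_true, beq_iff_eq, Bool.or_eq_true, PySem.List.count_eq]
    rw [count_map_cnt rs rs 1 1 (by norm_num), count_map_cnt rs rs 4 4 (by norm_num)]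
    rw [mem_map_cnt rs rs, mem_map_cnt rs rs]
    rw [hc1, hc2]
    have hm13 : (∀ r ∈ rs, ((List.count r rs : Nat) : Int) = 1 ∨ ((List.count r rs : Nat) : Int) = 3)
        ↔ (∀ r ∈ rs, List.count r rs = 1 ∨ List.count r rs = 3) := by
      apply forall₂_congr
      intro r _
      constructor <;> (rintro (h | h) <;> [left; right] <;> exact_mod_cast h)
    have hm34 : (∀ r ∈ rs, ((List.count r rs : Nat) : Int) = 3 ∨ ((List.count r rs : Nat) : Int) = 4)
        ↔ (∀ r ∈ rs, List.count r rs = 3 ∨ List.count r rs = 4) := by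
      apply forall₂_congr
      intro r _
      constructor <;> (rintro (h | h) <;> [left; right] <;> exact_mod_cast h)
    rw [hm13, hm34]
    constructor
    · rintro (⟨_, hm, hr⟩ | ⟨_, hm, hr⟩)
      · exact Or.inl ⟨hm, hr⟩
      · exact Or.inr ⟨hm, hr⟩
    · rintro (⟨hm, hr⟩ | ⟨hm, hr⟩)
      · exact Or.inl ⟨hlen, hm, hr⟩
      · exact Or.inr ⟨hlen, hm, hr⟩
  · conv_rhs => rw [if_pos (by simpa using hlen)]
    rw [Bool.eq_iff_iff, hif]
    simp only [Bool.false_eq_true, iff_false]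
    rintro (h | h)
    · exact hlen (hc1.mp h).1
    · exact hlen (hc2.mp h).1
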